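-- pv_equiv track=rewrite | github.com/tomhyhan/PEuler | dcontroller.py | solution
-- ===== SOURCE A (Python) =====
-- import heapq
--
-- def solution(jobs):
--     stand_by = [(start_time, req_time, idx) for idx, (start_time, req_time) in enumerate(jobs)]
--     queue = []
--
--     heapq.heapify(stand_by)
--
--     h_end = 0
--     total = 0
--     while stand_by:
--         if not queue:
--             start_time, req_time, idx = heapq.heappop(stand_by)
--             h_end = start_time
--             heapq.heappush(queue, (req_time, start_time, idx))
--
--         while queue:
--             req_time, start_time, idx = heapq.heappop(queue)
--
--             h_end += req_time
--             total += h_end - start_time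
--             while stand_by and h_end >= stand_by[0][0]:
--                 start_time, req_time, idx = heapq.heappop(stand_by)
--                 heapq.heappush(queue, (req_time, start_time, idx))
--
--     return total // len(jobs)
-- ===== SOURCE B (Python) =====
-- def solution(jobs):
--     # Direct event simulation: one counted loop over the n jobs, flat lists
--     # scanned linearly instead of the two heaps.
--     unreleased = [(s, r, i) for i, (s, r) in enumerate(jobs)]
--     released = []   # jobs already available, stored as (req_time, start_time, idx)
--     time = 0
--     total = 0
--     for _ in range(len(jobs)):
--         if released:
--             j = min(released)          # shortest available job: (req, start, idx)
--             released.remove(j)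
--             r, s, i = j
--         else:
--             j = min(unreleased)        # nothing available: take the earliest arrival
--             unreleased.remove(j)
--             s, r, i = j
--             time = s                   # jump the clock to its start
--         time += r
--         total += time - s
--         released += [(r2, s2, i2) for (s2, r2, i2) in unreleased if s2 <= time]
--         unreleased = [u for u in unreleased if u[0] > time]
--     return total // len(jobs)
-- ===== Notes on version B (the rewrite author's own statement) =====
-- stated objective: simpler
-- what changed: Replaces the two heaps and nested while-loops by a direct event simulation: a single counted loop over the n jobs that linearly scans flat unreleased/released lists (min by tuple, filter to move newly started jobs), instead of heapify/heappush/heappop with an inner drain loop.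
import Mathlib
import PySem

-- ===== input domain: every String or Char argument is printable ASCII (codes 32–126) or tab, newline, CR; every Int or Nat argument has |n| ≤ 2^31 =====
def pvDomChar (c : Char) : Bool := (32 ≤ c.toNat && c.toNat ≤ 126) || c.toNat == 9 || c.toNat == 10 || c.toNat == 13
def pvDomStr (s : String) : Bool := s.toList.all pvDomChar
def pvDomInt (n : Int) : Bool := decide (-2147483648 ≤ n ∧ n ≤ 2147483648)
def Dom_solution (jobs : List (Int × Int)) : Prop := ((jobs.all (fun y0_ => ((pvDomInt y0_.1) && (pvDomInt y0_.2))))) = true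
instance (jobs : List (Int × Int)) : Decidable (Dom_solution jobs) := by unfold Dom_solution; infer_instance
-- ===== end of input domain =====

-- B replaces A's two heaps and nested while-loops by a single counted loop that
-- linearly scans flat unreleased/released lists (objective: simpler; not faster).

-- Python's '<' on int 3-tuples (lexicographic); the comparison heapq and min() use here.
def pvLt3 (a b : Int × Int × Int) : Bool :=
  a.1 < b.1 || (a.1 == b.1 && (a.2.1 < b.2.1 || (a.2.1 == b.2.1 && a.2.2 < b.2.2)))

-- the pvLt3-smallest element of x :: l (what heappop / heap[0] / min() yield)
def pvMin3 (x : Int × Int × Int) (l : List (Int × Int × Int)) : Int × Int × Int :=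
  l.foldl (fun m y => if pvLt3 y m then y else m) x

-- needed by the ports' termination proofs (cited by name in decreasing_by)
theorem pvMin3_mem (x : Int × Int × Int) (l : List (Int × Int × Int)) :
    pvMin3 x l ∈ x :: l := by
  induction l generalizing x with
  | nil => simp [pvMin3]
  | cons a t ih =>
    simp only [pvMin3, List.foldl_cons]
    by_cases hax : pvLt3 a x = true
    · rw [if_pos hax]
      have h := ih a
      simp only [pvMin3] at h
      rcases List.mem_cons.mp h with h' | h' <;> simp [h']
    · rw [if_neg hax]
      have h := ih x
      simp only [pvMin3] at h
      rcases List.mem_cons.mp h with h' | h' <;> simp [h']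

theorem pvEraseMin_lt (x : Int × Int × Int) (rest : List (Int × Int × Int)) :
    ((x :: rest).erase (pvMin3 x rest)).length < (x :: rest).length := by
  have h1 := List.length_erase_of_mem (pvMin3_mem x rest)
  have h2 : (x :: rest).length = rest.length + 1 := rfl
  omega

-- ===== PORT A =====
-- The heaps are modelled by their multiset of elements: heapify keeps the elements,
-- heappush appends, heappop removes the pvLt3-smallest element, heap[0] is that
-- smallest element — exact for heapq (pop/peek always yield the smallest tuple).

-- the inner 'while stand_by and h_end >= stand_by[0][0]: … heappop … heappush …' drain loop
def pvDrain : List (Int × Int × Int) → List (Int × Int × Int) → Int →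
    List (Int × Int × Int) × List (Int × Int × Int)
  | [], q, _ => ([], q)
  | x :: rest, q, h =>
    if (pvMin3 x rest).1 ≤ h then
      pvDrain ((x :: rest).erase (pvMin3 x rest))
        (q ++ [((pvMin3 x rest).2.1, (pvMin3 x rest).1, (pvMin3 x rest).2.2)]) h
    else (x :: rest, q)
termination_by sb _ _ => sb.length
decreasing_by exact pvEraseMin_lt x rest

theorem pvDrain_length (sb q : List (Int × Int × Int)) (h : Int) :
    (pvDrain sb q h).1.length + (pvDrain sb q h).2.length = sb.length + q.length := by
  induction sb, q, h using pvDrain.induct with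
  | case1 q h => simp [pvDrain]
  | case2 x rest q h hle ih =>
    rw [pvDrain]
    simp only [hle, if_pos]
    have := List.length_erase_of_mem (pvMin3_mem x rest)
    simp at this
    simp [ih]
    omega
  | case3 x rest q h hle => rw [pvDrain]; simp [hle]

theorem pvDrain_fst_le (sb q : List (Int × Int × Int)) (h : Int) :
    (pvDrain sb q h).1.length ≤ sb.length := by
  induction sb, q, h using pvDrain.induct with
  | case1 q h => simp [pvDrain]
  | case2 x rest q h hle ih =>
    rw [pvDrain]
    simp only [hle, if_pos]
    have h1 := List.length_erase_of_mem (pvMin3_mem x rest)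
    have h2 : (x :: rest).length = rest.length + 1 := rfl
    omega
  | case3 x rest q h hle => rw [pvDrain]; simp [hle]

-- the two decreasing facts pvALoop's decreasing_by cites by name
theorem pvALoopDec1 (sb : List (Int × Int × Int)) (y : Int × Int × Int)
    (qrest : List (Int × Int × Int)) (h : Int) :
    2 * ((pvDrain sb ((y :: qrest).erase (pvMin3 y qrest)) h).1.length +
         (pvDrain sb ((y :: qrest).erase (pvMin3 y qrest)) h).2.length) +
      (pvDrain sb ((y :: qrest).erase (pvMin3 y qrest)) h).1.length
    < 2 * (sb.length + (y :: qrest).length) + sb.length := by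
  have h1 := pvDrain_length sb ((y :: qrest).erase (pvMin3 y qrest)) h
  have h2 := pvDrain_fst_le sb ((y :: qrest).erase (pvMin3 y qrest)) h
  have h3 := List.length_erase_of_mem (pvMin3_mem y qrest)
  have h4 : (y :: qrest).length = qrest.length + 1 := rfl
  omega

theorem pvALoopDec2 (x : Int × Int × Int) (srest : List (Int × Int × Int)) :
    2 * (((x :: srest).erase (pvMin3 x srest)).length +
         ([((pvMin3 x srest).2.1, (pvMin3 x srest).1, (pvMin3 x srest).2.2)] :
            List (Int × Int × Int)).length) +
      ((x :: srest).erase (pvMin3 x srest)).length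
    < 2 * ((x :: srest).length + ([] : List (Int × Int × Int)).length) + (x :: srest).length := by
  have h1 := List.length_erase_of_mem (pvMin3_mem x srest)
  have h2 : (x :: srest).length = srest.length + 1 := rfl
  have h3 : ([((pvMin3 x srest).2.1, (pvMin3 x srest).1, (pvMin3 x srest).2.2)] :
      List (Int × Int × Int)).length = 1 := rfl
  have h4 : ([] : List (Int × Int × Int)).length = 0 := rfl
  omega

-- the outer 'while stand_by' / inner 'while queue' loops of A, state (stand_by, queue, h_end, total)
def pvALoop : List (Int × Int × Int) → List (Int × Int × Int) → Int → Int → Int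
  | sb, y :: qrest, h, t =>
    pvALoop (pvDrain sb ((y :: qrest).erase (pvMin3 y qrest)) (h + (pvMin3 y qrest).1)).1
            (pvDrain sb ((y :: qrest).erase (pvMin3 y qrest)) (h + (pvMin3 y qrest).1)).2
            (h + (pvMin3 y qrest).1)
            (t + ((h + (pvMin3 y qrest).1) - (pvMin3 y qrest).2.1))
  | [], [], _, t => t
  | x :: srest, [], _, t =>
    pvALoop ((x :: srest).erase (pvMin3 x srest))
            [((pvMin3 x srest).2.1, (pvMin3 x srest).1, (pvMin3 x srest).2.2)]
            (pvMin3 x srest).1 t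
termination_by sb q _ _ => 2 * (sb.length + q.length) + sb.length
decreasing_by
  · exact pvALoopDec1 sb y qrest (h + (pvMin3 y qrest).1)
  · exact pvALoopDec2 x srest

def solution (jobs : List (Int × Int)) : Int :=
  PySem.Int.floordiv
    (pvALoop ((PySem.List.enumerate jobs).map (fun p => (p.2.1, p.2.2, p.1))) [] 0 0)
    (jobs.length : Int)

-- ===== PORT B =====
-- one iteration of Source B's 'for _ in range(len(jobs))' body, state (unreleased, released, time, total)
def pvBStep (st : List (Int × Int × Int) × List (Int × Int × Int) × Int × Int) :
    List (Int × Int × Int) × List (Int × Int × Int) × Int × Int :=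
  match st with
  | (ur, z :: rrest, time, total) =>
    (ur.filter (fun u => decide ((time + (pvMin3 z rrest).1) < u.1)),
     ((z :: rrest).erase (pvMin3 z rrest)) ++
       (ur.filter (fun u => decide (u.1 ≤ time + (pvMin3 z rrest).1))).map
         (fun u => (u.2.1, u.1, u.2.2)),
     time + (pvMin3 z rrest).1,
     total + ((time + (pvMin3 z rrest).1) - (pvMin3 z rrest).2.1))
  | (x :: urest, [], _, total) =>
    (((x :: urest).erase (pvMin3 x urest)).filter
       (fun u => decide (((pvMin3 x urest).1 + (pvMin3 x urest).2.1) < u.1)),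
     (((x :: urest).erase (pvMin3 x urest)).filter
       (fun u => decide (u.1 ≤ (pvMin3 x urest).1 + (pvMin3 x urest).2.1))).map
         (fun u => (u.2.1, u.1, u.2.2)),
     (pvMin3 x urest).1 + (pvMin3 x urest).2.1,
     total + (((pvMin3 x urest).1 + (pvMin3 x urest).2.1) - (pvMin3 x urest).1))
  | ([], [], time, total) => ([], [], time, total)  -- unreachable from solution_alt: each of the n iterations removes one of the n jobs

def solution_alt (jobs : List (Int × Int)) : Int :=
  PySem.Int.floordiv
    ((PySem.List.pyRange 0 (jobs.length : Int) 1).foldl (fun st _ => pvBStep st)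
      ((PySem.List.enumerate jobs).map (fun p => (p.2.1, p.2.2, p.1)), [], 0, 0)).2.2.2
    (jobs.length : Int)

-- ===== PRECONDITION & SPEC =====
-- Pre_ excludes only jobs = [], where the Python A raises ZeroDivisionError (total // len(jobs)).
def Pre_solution (jobs : List (Int × Int)) : Prop := jobs ≠ []
instance (jobs : List (Int × Int)) : Decidable (Pre_solution jobs) := by unfold Pre_solution; infer_instance
def pvWitness_solution : (List (Int × Int)) := [(0, 3), (1, 9), (2, 6)]

def Spec_solution (jobs : List (Int × Int)) (out : Int) : Prop := out = solution_alt jobs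
instance (jobs : List (Int × Int)) (out : Int) : Decidable (Spec_solution jobs out) := by unfold Spec_solution; infer_instance

-- ===== CLAIM (what is proved, stated in full; the proofs are below) =====
def Claim_equal_solution : Prop := ∀ (jobs : List (Int × Int)), Dom_solution jobs → Pre_solution jobs → Spec_solution jobs (solution jobs)

-- ===== LEMMAS AND PROOFS =====

theorem pvLt3_irrefl (a : Int × Int × Int) : pvLt3 a a = false := by
  simp [pvLt3]

theorem pvLt3_connex {a b : Int × Int × Int}
    (h1 : pvLt3 a b = false) (h2 : pvLt3 b a = false) : a = b := by
  rcases a with ⟨a1, a2, a3⟩; rcases b with ⟨b1, b2, b3⟩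
  simp [pvLt3] at h1 h2
  simp only [Prod.mk.injEq]
  omega

theorem pvLt3_trans {a b c : Int × Int × Int}
    (h1 : pvLt3 a b = true) (h2 : pvLt3 b c = true) : pvLt3 a c = true := by
  rcases a with ⟨a1, a2, a3⟩; rcases b with ⟨b1, b2, b3⟩; rcases c with ⟨c1, c2, c3⟩
  simp [pvLt3] at h1 h2 ⊢
  omega

theorem pvLt3_trans_le_lt {a b c : Int × Int × Int}
    (h1 : pvLt3 b a = false) (h2 : pvLt3 b c = true) : pvLt3 a c = true := by
  rcases a with ⟨a1, a2, a3⟩; rcases b with ⟨b1, b2, b3⟩; rcases c with ⟨c1, c2, c3⟩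
  simp [pvLt3] at h1 h2 ⊢
  omega

theorem pvLt3_false_fst {a b : Int × Int × Int} (h : pvLt3 a b = false) : b.1 ≤ a.1 := by
  rcases a with ⟨a1, a2, a3⟩; rcases b with ⟨b1, b2, b3⟩
  simp [pvLt3] at h ⊢
  omega

theorem pvMin3_isMin (x : Int × Int × Int) (l : List (Int × Int × Int)) :
    ∀ y ∈ x :: l, pvLt3 y (pvMin3 x l) = false := by
  induction l generalizing x with
  | nil =>
    intro y hy
    simp at hy
    subst hy
    simp [pvMin3, pvLt3_irrefl]
  | cons a t ih =>
    intro y hy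
    have hm : pvMin3 x (a :: t) = pvMin3 (if pvLt3 a x then a else x) t := rfl
    rw [hm]
    by_cases hax : pvLt3 a x = true
    · rw [if_pos hax]
      rcases List.mem_cons.mp hy with h1 | h1
      · rw [h1]
        by_contra hxl
        simp only [Bool.not_eq_false] at hxl
        have h2 := pvLt3_trans hax hxl
        have h3 := ih a a (by simp)
        simp [h3] at h2
      · exact ih a y h1
    · rw [if_neg hax]
      rcases List.mem_cons.mp hy with h1 | h1
      · rw [h1]
        exact ih x x (by simp)
      · rcases List.mem_cons.mp h1 with h2 | h2
        · rw [h2]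
          by_contra hal
          simp only [Bool.not_eq_false] at hal
          have hax' : pvLt3 a x = false := by simpa using hax
          have h3 := pvLt3_trans_le_lt hax' hal
          have h4 := ih x x (by simp)
          simp [h4] at h3
        · exact ih x y (List.mem_cons_of_mem _ h2)

theorem pvMin3_perm {x y : Int × Int × Int} {l l' : List (Int × Int × Int)}
    (hp : (x :: l).Perm (y :: l')) : pvMin3 x l = pvMin3 y l' := by
  apply pvLt3_connex
  · exact pvMin3_isMin y l' _ (hp.mem_iff.mp (pvMin3_mem x l))
  · exact pvMin3_isMin x l _ (hp.symm.mem_iff.mp (pvMin3_mem y l'))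

theorem pvDrain_spec (sb q : List (Int × Int × Int)) (h : Int) :
    (pvDrain sb q h).1.Perm (sb.filter (fun u => decide (h < u.1))) ∧
    (pvDrain sb q h).2.Perm
      (q ++ (sb.filter (fun u => decide (u.1 ≤ h))).map (fun u => (u.2.1, u.1, u.2.2))) := by
  induction sb, q, h using pvDrain.induct with
  | case1 q h => simp [pvDrain]
  | case2 x rest q h hle ih =>
    rw [pvDrain]
    simp only [hle, if_pos]
    have hperm : (x :: rest).Perm
        (pvMin3 x rest :: (x :: rest).erase (pvMin3 x rest)) :=
      List.perm_cons_erase (pvMin3_mem x rest)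
    have hnot : ¬ (h < (pvMin3 x rest).1) := not_lt.mpr hle
    constructor
    · refine ih.1.trans ?_
      have he : ((pvMin3 x rest :: (x :: rest).erase (pvMin3 x rest)).filter (fun u => decide (h < u.1)))
          = ((x :: rest).erase (pvMin3 x rest)).filter (fun u => decide (h < u.1)) := by
        simp [hnot]
      have hf := (hperm.filter (fun u => decide (h < u.1))).symm
      rw [he] at hf
      exact hf
    · refine ih.2.trans ?_
      have h2 : ((x :: rest).filter (fun u => decide (u.1 ≤ h))).Perm
          (pvMin3 x rest :: ((x :: rest).erase (pvMin3 x rest)).filter (fun u => decide (u.1 ≤ h))) := by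
        have hf := hperm.filter (fun u => decide (u.1 ≤ h))
        have he : ((pvMin3 x rest :: (x :: rest).erase (pvMin3 x rest)).filter (fun u => decide (u.1 ≤ h)))
            = pvMin3 x rest :: ((x :: rest).erase (pvMin3 x rest)).filter (fun u => decide (u.1 ≤ h)) := by
          simp [hle]
        rw [he] at hf
        exact hf
      have h4 := List.Perm.append_left q (h2.symm.map (fun u => (u.2.1, u.1, u.2.2)))
      simpa using h4
  | case3 x rest q h hle =>
    rw [pvDrain]
    simp only [hle, if_neg, not_false_iff]
    have hmin : ∀ u ∈ x :: rest, ¬ (u.1 ≤ h) := by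
      intro u hu
      have := pvLt3_false_fst (pvMin3_isMin x rest u hu)
      omega
    constructor
    · rw [List.filter_eq_self.mpr]
      intro u hu
      simpa using (by have := hmin u hu; omega : h < u.1)
    · rw [List.filter_eq_nil_iff.mpr]
      · simp
      · intro u hu
        simpa using hmin u hu

theorem pvFoldl_const_iterate {α β : Type} (f : α → α) (l : List β) (a : α) :
    l.foldl (fun st _ => f st) a = f^[l.length] a := by
  induction l generalizing a with
  | nil => simp
  | cons b t ih => simp [ih, Function.iterate_succ_apply]

theorem pvMain : ∀ (n : Nat) (sb q ur rel : List (Int × Int × Int)) (h t : Int),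
    sb.length + q.length = n → sb.Perm ur → q.Perm rel →
    pvALoop sb q h t = (pvBStep^[n] (ur, rel, h, t)).2.2.2 := by
  intro n
  induction n with
  | zero =>
    intro sb q ur rel h t hlen hp1 hp2
    have hsb : sb = [] := List.length_eq_zero_iff.mp (by omega)
    have hq : q = [] := List.length_eq_zero_iff.mp (by omega)
    subst hsb hq
    have hur : ur = [] := hp1.symm.eq_nil
    have hrel : rel = [] := hp2.symm.eq_nil
    subst hur hrel
    rw [pvALoop]
    simp [Function.iterate_zero]
  | succ n ih =>
    intro sb q ur rel h t hlen hp1 hp2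
    cases q with
    | cons y qrest =>
      cases rel with
      | nil =>
        have := hp2.eq_nil
        simp at this
      | cons z rrest =>
        rw [Function.iterate_succ_apply]
        rw [pvALoop]
        simp only [pvBStep]
        rw [← pvMin3_perm hp2]
        apply ih
        · have hd := pvDrain_length sb ((y :: qrest).erase (pvMin3 y qrest)) (h + (pvMin3 y qrest).1)
          have he := List.length_erase_of_mem (pvMin3_mem y qrest)
          have hc : (y :: qrest).length = qrest.length + 1 := rfl
          omega
        · exact (pvDrain_spec sb ((y :: qrest).erase (pvMin3 y qrest)) (h + (pvMin3 y qrest).1)).1.trans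
            (hp1.filter _)
        · refine (pvDrain_spec sb ((y :: qrest).erase (pvMin3 y qrest)) (h + (pvMin3 y qrest).1)).2.trans ?_
          exact List.Perm.append (hp2.erase _) ((hp1.filter _).map _)
    | nil =>
      cases sb with
      | nil => simp at hlen
      | cons x srest =>
        have hrel : rel = [] := hp2.symm.eq_nil
        subst hrel
        cases ur with
        | nil =>
          have := hp1.eq_nil
          simp at this
        | cons w wrest =>
          rw [Function.iterate_succ_apply]
          rw [pvALoop]
          rw [pvALoop]
          simp only [pvBStep]
          rw [← pvMin3_perm hp1]
          have hone : pvMin3 ((pvMin3 x srest).2.1, (pvMin3 x srest).1, (pvMin3 x srest).2.2)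
              ([] : List (Int × Int × Int)) =
              ((pvMin3 x srest).2.1, (pvMin3 x srest).1, (pvMin3 x srest).2.2) := rfl
          rw [hone]
          have herase : ([((pvMin3 x srest).2.1, (pvMin3 x srest).1, (pvMin3 x srest).2.2)]).erase
              ((pvMin3 x srest).2.1, (pvMin3 x srest).1, (pvMin3 x srest).2.2) = [] := by simp
          rw [herase]
          apply ih
          · show (pvDrain ((x :: srest).erase (pvMin3 x srest)) []
                ((pvMin3 x srest).1 + (pvMin3 x srest).2.1)).1.length +
              (pvDrain ((x :: srest).erase (pvMin3 x srest)) []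
                ((pvMin3 x srest).1 + (pvMin3 x srest).2.1)).2.length = n
            have hd := pvDrain_length ((x :: srest).erase (pvMin3 x srest)) []
              ((pvMin3 x srest).1 + (pvMin3 x srest).2.1)
            have he := List.length_erase_of_mem (pvMin3_mem x srest)
            have hc : (x :: srest).length = srest.length + 1 := rfl
            have hnil : ([] : List (Int × Int × Int)).length = 0 := rfl
            omega
          · exact (pvDrain_spec ((x :: srest).erase (pvMin3 x srest)) []
              ((pvMin3 x srest).1 + (pvMin3 x srest).2.1)).1.trans ((hp1.erase _).filter _)
          · refine (pvDrain_spec ((x :: srest).erase (pvMin3 x srest)) []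
              ((pvMin3 x srest).1 + (pvMin3 x srest).2.1)).2.trans ?_
            simpa using (((hp1.erase _).filter _).map _)

-- ===== VERDICT (by name: the statement is the Claim_ definition above) =====
theorem solution_spec : Claim_equal_solution := by
  intro jobs _ _
  unfold Spec_solution solution solution_alt
  rw [pvFoldl_const_iterate]
  rw [PySem.List.length_pyRange_one]
  have hn : ((jobs.length : Int) - 0).toNat = ((PySem.List.enumerate jobs).map (fun p => (p.2.1, p.2.2, p.1))).length + ([] : List (Int × Int × Int)).length := by
    simp [PySem.List.length_enumerate]
  rw [hn]
  rw [pvMain _ _ _ _ _ _ _ rfl (List.Perm.refl _) (List.Perm.refl _)]
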